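-- pv_equiv track=rewrite | github.com/laurarodriguezfe/pne-studentslab | P00/Seq0.py | most_frequent_base
-- ===== SOURCE A (Python) =====
-- def most_frequent_base(seq):
--     bases = {"A": 0, "T": 0, "C": 0, "G": 0}
--     for base in seq:
--         if base in bases:
--             bases[base] += 1
--     most_frequent = None
--     highest_count = -1
--     for base, count in bases.items():
--         if count > highest_count:
--             most_frequent = base
--             highest_count = count
--     return most_frequent
-- ===== SOURCE B (Python) =====
-- def most_frequent_base(seq):
--     s = sorted(b for b in seq if b in "ATCG")
--     best, best_n = "A", 0
--     run, run_n = None, 0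
--     for b in s:
--         if b == run:
--             run_n += 1
--         else:
--             run, run_n = b, 1
--         if run_n > best_n or (run_n == best_n and "ATCG".index(run) < "ATCG".index(best)):
--             best, best_n = run, run_n
--     return best
-- ===== Notes on version B (the rewrite author's own statement) =====
-- stated objective: alternative
-- what changed: Replaces A's one-pass dict-increment counting plus an argmax scan over the dict items by a sort-based algorithm: filter the valid bases, sort them, and run-length-scan the sorted list keeping the best run (ties broken by position in "ATCG", reproducing A's A>T>C>G rule and the empty/all-invalid -> 'A' result).
import Mathlib
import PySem

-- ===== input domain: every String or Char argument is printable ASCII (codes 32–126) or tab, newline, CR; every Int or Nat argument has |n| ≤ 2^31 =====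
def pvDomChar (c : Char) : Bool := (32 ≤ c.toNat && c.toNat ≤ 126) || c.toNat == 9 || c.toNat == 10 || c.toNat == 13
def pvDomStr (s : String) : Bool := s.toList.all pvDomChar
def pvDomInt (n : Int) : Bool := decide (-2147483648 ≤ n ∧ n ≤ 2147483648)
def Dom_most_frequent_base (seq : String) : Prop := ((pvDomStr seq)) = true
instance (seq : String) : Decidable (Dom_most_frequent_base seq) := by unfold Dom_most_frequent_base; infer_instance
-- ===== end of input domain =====

-- B replaces A's dict-increment pass + argmax over the dict by sort-then-run-length-scan:
-- keep the valid bases, sort them, and scan the runs of equal letters keeping the best run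
-- (ties broken by position in "ATCG", reproducing A's A>T>C>G rule). Objective: alternative.

-- ===== PORT A =====
-- Python iterates a str yielding 1-char strings used as dict keys; ported with Char keys,
-- the final key is wrapped back into a 1-char String at the return (exact on all inputs).
def most_frequent_base (seq : String) : String :=
  let bases0 : PySem.Dict Char Int :=
    ((((PySem.Dict.empty).insert 'A' 0).insert 'T' 0).insert 'C' 0).insert 'G' 0
  let bases := seq.toList.foldl
    (fun d b => if d.contains b then d.modify b 0 (· + 1) else d) bases0
  let sel := bases.items.foldl
    (fun (st : Option Char × Int) p => if p.2 > st.2 then (some p.1, p.2) else st)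
    (none, -1)
  match sel.1 with
  | some c => String.ofList [c]
  | none => ""        -- Python would return None here; unreachable (the dict always has 4 items)

-- ===== PORT B =====
-- "ATCG".index(c): Python .index raises when absent, but here the argument is always one of
-- A,T,C,G (it was kept by the filter / starts as "A"), where .index and find agree.
def pvBIdx (c : Char) : Int := PySem.Str.find "ATCG" (String.ofList [c])

-- the loop body; after Python's if/else `run = b` holds in both branches, only run_n differs
def pvBStep (st : Char × Int × Option Char × Int) (b : Char) : Char × Int × Option Char × Int :=
  match st with
  | (best, bn, run, rn) =>
    let rn' : Int := if run == some b then rn + 1 else 1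
    if rn' > bn ∨ (rn' = bn ∧ pvBIdx b < pvBIdx best) then (b, rn', some b, rn')
    else (best, bn, some b, rn')

def most_frequent_base_alt (seq : String) : String :=
  -- `b in "ATCG"` on a 1-char b is substring membership = character membership
  let s := PySem.List.sorted
    (seq.toList.filter (fun b => PySem.Chars.isIn [b] "ATCG".toList)) (fun x => x) false
  let fin := s.foldl pvBStep ('A', 0, none, 0)
  String.ofList [fin.1]

-- ===== PRECONDITION & SPEC =====
def Spec_most_frequent_base (seq : String) (out : String) : Prop := out = most_frequent_base_alt seq
instance (seq : String) (out : String) : Decidable (Spec_most_frequent_base seq out) := by unfold Spec_most_frequent_base; infer_instance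

-- ===== CLAIM (what is proved, stated in full; the proofs are below) =====
def Claim_equal_most_frequent_base : Prop := ∀ (seq : String), Dom_most_frequent_base seq → Spec_most_frequent_base seq (most_frequent_base seq)

-- ===== LEMMAS AND PROOFS =====

/-- The winner as a function of the four counts, in A's scan order A,T,C,G with strict `>`. -/
def pvPick (a t c g : Int) : Char :=
  if t > a then
    if c > t then (if g > c then 'G' else 'C') else (if g > t then 'G' else 'T')
  else
    if c > a then (if g > c then 'G' else 'C') else (if g > a then 'G' else 'A')

/-- The four-key dict of A's counting loop, with the current counts. -/
def pvDict4 (a t c g : Int) : PySem.Dict Char Int :=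
  ((((PySem.Dict.empty).insert 'A' a).insert 'T' t).insert 'C' c).insert 'G' g

theorem pvContains4_false (a t c g : Int) (x : Char)
    (hA : x ≠ 'A') (hT : x ≠ 'T') (hC : x ≠ 'C') (hG : x ≠ 'G') :
    (pvDict4 a t c g).contains x = false := by
  simp [pvDict4, PySem.Dict.contains_insert, PySem.Dict.contains_empty, hA, hT, hC, hG]

/-- A's counting loop keeps the dict in `pvDict4` shape and adds the list-counts. -/
theorem pvFoldDict (l : List Char) : ∀ (a t c g : Int),
    l.foldl (fun d b => if d.contains b then d.modify b 0 (· + 1) else d) (pvDict4 a t c g)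
      = pvDict4 (a + l.count 'A') (t + l.count 'T') (c + l.count 'C') (g + l.count 'G') := by
  induction l with
  | nil => intro a t c g; simp
  | cons x l ih =>
    intro a t c g
    rw [List.foldl_cons]
    by_cases hA : x = 'A'
    · subst hA
      rw [show (if (pvDict4 a t c g).contains 'A' then (pvDict4 a t c g).modify 'A' 0 (· + 1)
            else pvDict4 a t c g) = pvDict4 (a + 1) t c g from rfl, ih]
      simp; ring_nf
    · by_cases hT : x = 'T'
      · subst hT
        rw [show (if (pvDict4 a t c g).contains 'T' then (pvDict4 a t c g).modify 'T' 0 (· + 1)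
              else pvDict4 a t c g) = pvDict4 a (t + 1) c g from rfl, ih]
        simp; ring_nf
      · by_cases hC : x = 'C'
        · subst hC
          rw [show (if (pvDict4 a t c g).contains 'C' then (pvDict4 a t c g).modify 'C' 0 (· + 1)
                else pvDict4 a t c g) = pvDict4 a t (c + 1) g from rfl, ih]
          simp; ring_nf
        · by_cases hG : x = 'G'
          · subst hG
            rw [show (if (pvDict4 a t c g).contains 'G' then (pvDict4 a t c g).modify 'G' 0 (· + 1)
                  else pvDict4 a t c g) = pvDict4 a t c (g + 1) from rfl, ih]
            simp; ring_nf
          · rw [if_neg (by simp [pvContains4_false a t c g x hA hT hC hG]), ih]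
            simp [hA, hT, hC, hG]

/-- A's explicit argmax loop over the four items produces `pvPick`. -/
theorem pvA (a t c g : Int) (ha : 0 ≤ a) :
    (([('A', a), ('T', t), ('C', c), ('G', g)].foldl
        (fun (st : Option Char × Int) p => if p.2 > st.2 then (some p.1, p.2) else st)
        ((none : Option Char), (-1 : Int))).1)
    = some (pvPick a t c g) := by
  simp only [List.foldl, pvPick]
  rw [if_pos (show a > (-1 : Int) by omega)]
  split_ifs <;> simp_all

theorem pvBIdxA : pvBIdx 'A' = 0 := by decide
theorem pvBIdxT : pvBIdx 'T' = 1 := by decide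
theorem pvBIdxC : pvBIdx 'C' = 2 := by decide
theorem pvBIdxG : pvBIdx 'G' = 3 := by decide

theorem pvSegCont (n : Nat) : ∀ (best : Char) (bn : Int) (x : Char) (k : Int), 1 ≤ k →
    ((best = x ∧ bn = k) ∨ (k ≤ bn ∧ ¬(k = bn ∧ pvBIdx x < pvBIdx best))) →
    (List.replicate n x).foldl pvBStep (best, bn, some x, k) =
      ((if (k + n : Int) > bn ∨ ((k + n : Int) = bn ∧ pvBIdx x < pvBIdx best) then x else best),
       max bn (k + n), some x, (k + n : Int)) := by
  induction n with
  | zero =>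
    intro best bn x k hk hinv
    simp only [Nat.cast_zero, add_zero, List.replicate, List.foldl_nil]
    rcases hinv with ⟨hb, hbn⟩ | ⟨hle, hnt⟩
    · subst hb; subst hbn; rw [if_neg, max_self]
      rintro (h | ⟨h1, h2⟩); exact absurd h (lt_irrefl _); exact absurd h2 (lt_irrefl _)
    · rw [if_neg, max_eq_left hle]
      rintro (h | ⟨h1, h2⟩); omega; exact hnt ⟨h1, h2⟩
  | succ m ih =>
    intro best bn x k hk hinv
    rw [List.replicate_succ, List.foldl_cons]
    have hstep : pvBStep (best, bn, some x, k) x =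
        if k + 1 > bn ∨ (k + 1 = bn ∧ pvBIdx x < pvBIdx best) then (x, k+1, some x, k+1)
        else (best, bn, some x, k+1) := by
      simp [pvBStep]
    by_cases htr : k + 1 > bn ∨ (k + 1 = bn ∧ pvBIdx x < pvBIdx best)
    · rw [hstep, if_pos htr, ih x (k+1) x (k+1) (by omega) (Or.inl ⟨rfl, rfl⟩)]
      push_cast
      simp only [ite_self]
      have hx : (if k + ((m:Int)+1) > bn ∨ (k + ((m:Int)+1) = bn ∧ pvBIdx x < pvBIdx best) then x else best) = x := by
        rcases htr with h | ⟨h1, h2⟩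
        · exact if_pos (Or.inl (by omega))
        · rcases eq_or_lt_of_le (show (0:Int) ≤ (m:Int) by positivity) with hm | hm
          · exact if_pos (Or.inr ⟨by omega, h2⟩)
          · exact if_pos (Or.inl (by omega))
      rw [hx]
      simp only [Prod.mk.injEq, true_and]
      exact ⟨by omega, by omega⟩
    · rw [hstep, if_neg htr,
        ih best bn x (k+1) (by omega) (Or.inr ⟨by omega, fun ⟨h1,h2⟩ => htr (Or.inr ⟨h1,h2⟩)⟩)]
      push_cast
      have : k + 1 + (m : Int) = k + ((m : Int) + 1) := by ring
      rw [this]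

theorem pvSegEntry (n : Nat) (best : Char) (bn : Int) (x : Char) (run : Option Char) (rn : Int)
    (hn : 1 ≤ n) (hrun : run ≠ some x) (hbn : 0 ≤ bn) :
    (List.replicate n x).foldl pvBStep (best, bn, run, rn) =
      ((if (n : Int) > bn ∨ ((n : Int) = bn ∧ pvBIdx x < pvBIdx best) then x else best),
       max bn n, some x, (n : Int)) := by
  obtain ⟨m, rfl⟩ : ∃ m, n = m + 1 := ⟨n - 1, by omega⟩
  rw [List.replicate_succ, List.foldl_cons]
  have hbeq : (run == some x) = false := by
    cases run with
    | none => rfl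
    | some c => simp_all
  have hstep : pvBStep (best, bn, run, rn) x =
      if (1:Int) > bn ∨ ((1:Int) = bn ∧ pvBIdx x < pvBIdx best) then (x, 1, some x, 1)
      else (best, bn, some x, 1) := by
    simp [pvBStep, hbeq]
  by_cases htr : (1:Int) > bn ∨ ((1:Int) = bn ∧ pvBIdx x < pvBIdx best)
  · rw [hstep, if_pos htr, pvSegCont m x 1 x 1 le_rfl (Or.inl ⟨rfl, rfl⟩)]
    push_cast
    simp only [ite_self]
    have hx : (if ((m:Int)+1) > bn ∨ (((m:Int)+1) = bn ∧ pvBIdx x < pvBIdx best) then x else best) = x := by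
      rcases htr with h | ⟨h1, h2⟩
      · exact if_pos (Or.inl (by omega))
      · rcases eq_or_lt_of_le (show (0:Int) ≤ (m:Int) by positivity) with hm | hm
        · exact if_pos (Or.inr ⟨by omega, h2⟩)
        · exact if_pos (Or.inl (by omega))
    rw [hx]
    simp only [Prod.mk.injEq, true_and]
    refine ⟨by omega, by omega⟩
  · rw [hstep, if_neg htr,
      pvSegCont m best bn x 1 le_rfl (Or.inr ⟨by omega, fun ⟨h1,h2⟩ => htr (Or.inr ⟨h1,h2⟩)⟩)]
    push_cast
    have : (1:Int) + (m:Int) = (m:Int) + 1 := by ring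
    rw [this]

theorem pvSegFull (n : Nat) (best : Char) (bn : Int) (run : Option Char) (rn : Int) (x : Char)
    (hrun : run ≠ some x) (hbn : 0 ≤ bn) (hA : bn = 0 → pvBIdx best ≤ pvBIdx x) :
    ∃ run' rn', (List.replicate n x).foldl pvBStep (best, bn, run, rn) =
      ((if (n : Int) > bn ∨ ((n : Int) = bn ∧ pvBIdx x < pvBIdx best) then x else best),
       max bn n, run', rn') ∧ (run' = run ∨ run' = some x) := by
  rcases Nat.eq_zero_or_pos n with h0 | hpos
  · subst h0
    refine ⟨run, rn, ?_, Or.inl rfl⟩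
    simp only [List.replicate, List.foldl_nil, Nat.cast_zero]
    rw [if_neg, max_eq_left hbn]
    rintro (h | ⟨h1, h2⟩)
    · omega
    · exact absurd h2 (not_lt.mpr (hA (by omega)))
  · exact ⟨some x, n, pvSegEntry n best bn x run rn hpos hrun hbn, Or.inr rfl⟩

theorem pvB (a c g t : Nat) :
    ((List.replicate a 'A' ++ (List.replicate c 'C' ++ (List.replicate g 'G' ++ List.replicate t 'T'))).foldl
        pvBStep ('A', (0 : Int), none, 0)).1 = pvPick a t c g := by
  rw [List.foldl_append, List.foldl_append, List.foldl_append]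
  obtain ⟨r1, k1, h1, hr1⟩ := pvSegFull a 'A' 0 none 0 'A' (by simp) le_rfl (fun _ => le_rfl)
  rw [h1, ite_self, max_eq_right (by positivity)]
  obtain ⟨r2, k2, h2, hr2⟩ := pvSegFull c 'A' a r1 k1 'C'
    (by rcases hr1 with h | h <;> simp [h]) (by positivity)
    (fun _ => by rw [pvBIdxA, pvBIdxC]; omega)
  rw [h2]
  simp only [pvBIdxA, pvBIdxC]
  have hr12 : r2 = none ∨ r2 = some 'A' ∨ r2 = some 'C' := by
    rcases hr2 with h | h
    · rcases hr1 with h' | h' <;> subst h <;> simp [h']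
    · simp [h]
  by_cases hc : ((c:Int) > (a:Int) ∨ ((c:Int) = (a:Int) ∧ (2:Int) < (0:Int)))
  · rw [if_pos hc]
    obtain ⟨r3, k3, h3, hr3⟩ := pvSegFull g 'C' (max (a:Int) (c:Int)) r2 k2 'G'
      (by rcases hr12 with h | h | h <;> simp [h]) (le_max_of_le_left (by positivity))
      (fun h => by rw [pvBIdxC, pvBIdxG]; omega)
    rw [h3]
    simp only [pvBIdxC, pvBIdxG]
    by_cases hg : ((g:Int) > max (a:Int) (c:Int) ∨ ((g:Int) = max (a:Int) (c:Int) ∧ (3:Int) < (2:Int)))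
    · rw [if_pos hg]
      obtain ⟨r4, k4, h4, hr4⟩ := pvSegFull t 'G' (max (max (a:Int) (c:Int)) (g:Int)) r3 k3 'T'
        (by rcases hr3 with h | h <;> rcases hr12 with h' | h' | h' <;> subst h <;> simp [h'])
        (le_max_of_le_left (le_max_of_le_left (by positivity)))
        (fun h => by rw [pvBIdxG, pvBIdxT]; omega)
      rw [h4]
      simp only [pvBIdxG, pvBIdxT, pvPick]
      split_ifs <;> first | rfl | omega
    · rw [if_neg hg]
      obtain ⟨r4, k4, h4, hr4⟩ := pvSegFull t 'C' (max (max (a:Int) (c:Int)) (g:Int)) r3 k3 'T'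
        (by rcases hr3 with h | h <;> rcases hr12 with h' | h' | h' <;> subst h <;> simp [h'])
        (le_max_of_le_left (le_max_of_le_left (by positivity)))
        (fun h => by rw [pvBIdxC, pvBIdxT]; omega)
      rw [h4]
      simp only [pvBIdxC, pvBIdxT, pvPick]
      split_ifs <;> first | rfl | omega
  · rw [if_neg hc]
    obtain ⟨r3, k3, h3, hr3⟩ := pvSegFull g 'A' (max (a:Int) (c:Int)) r2 k2 'G'
      (by rcases hr12 with h | h | h <;> simp [h]) (le_max_of_le_left (by positivity))
      (fun h => by rw [pvBIdxA, pvBIdxG]; omega)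
    rw [h3]
    simp only [pvBIdxA, pvBIdxG]
    by_cases hg : ((g:Int) > max (a:Int) (c:Int) ∨ ((g:Int) = max (a:Int) (c:Int) ∧ (3:Int) < (0:Int)))
    · rw [if_pos hg]
      obtain ⟨r4, k4, h4, hr4⟩ := pvSegFull t 'G' (max (max (a:Int) (c:Int)) (g:Int)) r3 k3 'T'
        (by rcases hr3 with h | h <;> rcases hr12 with h' | h' | h' <;> subst h <;> simp [h'])
        (le_max_of_le_left (le_max_of_le_left (by positivity)))
        (fun h => by rw [pvBIdxG, pvBIdxT]; omega)
      rw [h4]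
      simp only [pvBIdxG, pvBIdxT, pvPick]
      split_ifs <;> first | rfl | omega
    · rw [if_neg hg]
      obtain ⟨r4, k4, h4, hr4⟩ := pvSegFull t 'A' (max (max (a:Int) (c:Int)) (g:Int)) r3 k3 'T'
        (by rcases hr3 with h | h <;> rcases hr12 with h' | h' | h' <;> subst h <;> simp [h'])
        (le_max_of_le_left (le_max_of_le_left (by positivity)))
        (fun h => by rw [pvBIdxA, pvBIdxT]; omega)
      rw [h4]
      simp only [pvBIdxA, pvBIdxT, pvPick]
      split_ifs <;> first | rfl | omega

theorem pvIsInSingle (b : Char) (l : List Char) : PySem.Chars.isIn [b] l = l.contains b := by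
  rw [Bool.eq_iff_iff, PySem.Chars.isIn_iff_infix]
  simp [List.singleton_infix_iff]

theorem pvSortFilter (l : List Char) :
    PySem.List.sorted (l.filter (fun b => PySem.Chars.isIn [b] "ATCG".toList)) (fun x => x) false
      = List.replicate (l.count 'A') 'A' ++ (List.replicate (l.count 'C') 'C' ++
        (List.replicate (l.count 'G') 'G' ++ List.replicate (l.count 'T') 'T')) := by
  apply PySem.List.sorted_id_eq_of_perm_of_pairwise
  · rw [List.perm_iff_count]
    intro x
    by_cases hA : x = 'A'
    · subst hA
      rw [List.count_filter (by decide)]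
      simp [List.count_replicate, List.count_append]
    · by_cases hT : x = 'T'
      · subst hT
        rw [List.count_filter (by decide)]
        simp [List.count_replicate, List.count_append]
      · by_cases hC : x = 'C'
        · subst hC
          rw [List.count_filter (by decide)]
          simp [List.count_replicate, List.count_append]
        · by_cases hG : x = 'G'
          · subst hG
            rw [List.count_filter (by decide)]
            simp [List.count_replicate, List.count_append]
          · have h1 : (l.filter (fun b => PySem.Chars.isIn [b] "ATCG".toList)).count x = 0 := by
              refine List.count_eq_zero.mpr (fun hmem => ?_)
              rcases List.mem_filter.mp hmem with ⟨-, hp⟩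
              revert hp
              simp only [pvIsInSingle]
              simp
              tauto
            have h2 : (List.replicate (l.count 'A') 'A' ++ (List.replicate (l.count 'C') 'C' ++
                (List.replicate (l.count 'G') 'G' ++ List.replicate (l.count 'T') 'T'))).count x = 0 := by
              simp [List.count_append, List.count_replicate]
              exact ⟨fun h => (hA h.symm).elim, fun h => (hC h.symm).elim,
                fun h => (hG h.symm).elim, fun h => (hT h.symm).elim⟩
            rw [h1, h2]
  · refine List.pairwise_append.mpr ⟨?_, ?_, ?_⟩
    · exact List.pairwise_replicate.mpr (Or.inr le_rfl)
    · refine List.pairwise_append.mpr ⟨?_, ?_, ?_⟩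
      · exact List.pairwise_replicate.mpr (Or.inr le_rfl)
      · refine List.pairwise_append.mpr ⟨?_, ?_, ?_⟩
        · exact List.pairwise_replicate.mpr (Or.inr le_rfl)
        · exact List.pairwise_replicate.mpr (Or.inr le_rfl)
        · intro x hx y hy
          rw [List.eq_of_mem_replicate hx, List.eq_of_mem_replicate hy]
          decide
      · intro x hx y hy
        rw [List.eq_of_mem_replicate hx]
        rcases List.mem_append.mp hy with h | h <;>
          rw [List.eq_of_mem_replicate h] <;> decide
    · intro x hx y hy
      rw [List.eq_of_mem_replicate hx]
      rcases List.mem_append.mp hy with h | h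
      · rw [List.eq_of_mem_replicate h]; decide
      · rcases List.mem_append.mp h with h' | h' <;>
          rw [List.eq_of_mem_replicate h'] <;> decide

-- ===== VERDICT (by name: the statement is the Claim_ definition above) =====
theorem most_frequent_base_spec : Claim_equal_most_frequent_base := by
  intro seq _
  unfold Spec_most_frequent_base most_frequent_base most_frequent_base_alt
  have hfold := pvFoldDict seq.toList 0 0 0 0
  simp only [show ((((PySem.Dict.empty).insert 'A' (0:Int)).insert 'T' 0).insert 'C' 0).insert 'G' 0
      = pvDict4 0 0 0 0 from rfl, hfold, zero_add]
  have hitems : (pvDict4 (seq.toList.count 'A') (seq.toList.count 'T')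
      (seq.toList.count 'C') (seq.toList.count 'G')).items
      = [('A', (seq.toList.count 'A' : Int)), ('T', (seq.toList.count 'T' : Int)),
         ('C', (seq.toList.count 'C' : Int)), ('G', (seq.toList.count 'G' : Int))] := rfl
  rw [hitems, pvA _ _ _ _ (by positivity), pvSortFilter, pvB]
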